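-- pv_equiv track=rewrite | github.com/jcisio/adventofcode2023 | day22/d22.py | can_fall
-- ===== SOURCE A (Python) =====
-- def can_fall(spaces, brick):
--     d = 0
--     for dz in range(1, brick[2]):
--         for x in range(brick[0], brick[3]+1):
--             stop = False
--             for y in range(brick[1], brick[4]+1):
--                 if (x, y, brick[2]-dz) in spaces:
--                     stop = True
--                     break
--             if stop: break
--         if stop: break
--         d = dz
--     return d
-- ===== SOURCE B (Python) =====
-- def can_fall(spaces, brick):
--     # column-major: for each footprint column count clear levels below, keep the minimum
--     h = brick[2]
--     if h <= 1:
--         return 0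
--     best = h - 1
--     for x in range(brick[0], brick[3] + 1):
--         for y in range(brick[1], brick[4] + 1):
--             dist = 0
--             for k in range(1, h):
--                 if (x, y, h - k) in spaces:
--                     break
--                 dist += 1
--             if dist < best:
--                 best = dist
--     return best
-- ===== Notes on version B (the rewrite author's own statement) =====
-- stated objective: alternative
-- what changed: Replaced the level-major descent (drop the whole footprint one level at a time, breaking at the first blocked level) by a column-major scan: each footprint column independently counts its clear levels below and the answer is the running minimum over columns.
import Mathlib
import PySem

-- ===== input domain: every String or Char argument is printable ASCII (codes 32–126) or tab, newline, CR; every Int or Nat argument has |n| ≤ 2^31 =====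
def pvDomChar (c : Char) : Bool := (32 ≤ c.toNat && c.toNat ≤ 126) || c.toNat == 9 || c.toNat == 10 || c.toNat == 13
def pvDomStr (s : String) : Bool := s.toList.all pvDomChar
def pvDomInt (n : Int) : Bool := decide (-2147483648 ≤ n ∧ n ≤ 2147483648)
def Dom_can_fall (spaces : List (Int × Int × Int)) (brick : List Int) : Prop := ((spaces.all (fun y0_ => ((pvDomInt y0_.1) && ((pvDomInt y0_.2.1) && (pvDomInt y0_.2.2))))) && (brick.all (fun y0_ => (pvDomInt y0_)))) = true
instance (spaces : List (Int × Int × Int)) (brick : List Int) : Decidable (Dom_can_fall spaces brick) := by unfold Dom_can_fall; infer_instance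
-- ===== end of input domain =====

-- B replaces A's level-major descent (whole footprint drops one level at a time) by a
-- column-major scan: each footprint column counts its clear levels and B keeps the minimum
-- (objective: alternative decomposition, same cost).
-- Loops over Python's lazy range(a, b) are ported as fuel-counted recursions on the integer
-- bounds (fuel = (b - a).toNat), so a loop that breaks early does only the work Python does.

-- ===== PORT A =====
-- 'for … in range(…): if …: stop = True; break' — an early-exit existence scan over a range
def canFall_any (p : Int → Bool) : Nat → Int → Bool
  | 0, _ => false
  | n + 1, v => if p v then true else canFall_any p n (v + 1)

-- 'for dz in range(1, brick[2]): if <blocked>: break; d = dz'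
def canFall_outer (blocked : Int → Bool) : Nat → Int → Int → Int
  | 0, _, d => d
  | n + 1, dz, d => if blocked dz then d else canFall_outer blocked n (dz + 1) dz

def can_fall (spaces : List (Int × Int × Int)) (brick : List Int) : Int :=
  let b2 := PySem.List.pyGetD brick 2 0
  canFall_outer
    (fun dz =>
      canFall_any
        (fun x =>
          canFall_any (fun y => spaces.contains (x, y, b2 - dz))
            (PySem.List.pyGetD brick 4 0 + 1 - PySem.List.pyGetD brick 1 0).toNat
            (PySem.List.pyGetD brick 1 0))
        (PySem.List.pyGetD brick 3 0 + 1 - PySem.List.pyGetD brick 0 0).toNat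
        (PySem.List.pyGetD brick 0 0))
    (b2 - 1).toNat 1 0

-- ===== PORT B =====
-- B's inner 'for k' loop: count clear levels below one column, break at the first occupied one
def canFallAlt_colDist (hit : Int → Bool) : Nat → Int → Int → Int
  | 0, _, dist => dist
  | n + 1, k, dist => if hit k then dist else canFallAlt_colDist hit n (k + 1) (dist + 1)

-- a plain 'for v in range(…)' loop threading an accumulator
def canFallAlt_fold (f : Int → Int → Int) : Nat → Int → Int → Int
  | 0, _, acc => acc
  | n + 1, v, acc => canFallAlt_fold f n (v + 1) (f acc v)

def can_fall_alt (spaces : List (Int × Int × Int)) (brick : List Int) : Int :=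
  let h := PySem.List.pyGetD brick 2 0
  if h ≤ 1 then 0
  else
    canFallAlt_fold
      (fun best x =>
        canFallAlt_fold
          (fun best y =>
            let dist := canFallAlt_colDist (fun k => spaces.contains (x, y, h - k))
              (h - 1).toNat 1 0
            if dist < best then dist else best)
          (PySem.List.pyGetD brick 4 0 + 1 - PySem.List.pyGetD brick 1 0).toNat
          (PySem.List.pyGetD brick 1 0) best)
      (PySem.List.pyGetD brick 3 0 + 1 - PySem.List.pyGetD brick 0 0).toNat
      (PySem.List.pyGetD brick 0 0) (h - 1)

-- ===== PRECONDITION & SPEC =====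
-- Pre_ excludes exactly the inputs where Python A raises: brick too short for the indices it
-- reads (IndexError), or at least 2 levels with an empty x-range, where the loop flag 'stop'
-- is never assigned (NameError).
def Pre_can_fall (spaces : List (Int × Int × Int)) (brick : List Int) : Prop :=
  3 ≤ brick.length ∧
    (2 ≤ PySem.List.pyGetD brick 2 0 →
      (5 ≤ brick.length ∧ PySem.List.pyGetD brick 0 0 ≤ PySem.List.pyGetD brick 3 0))
instance (spaces : List (Int × Int × Int)) (brick : List Int) : Decidable (Pre_can_fall spaces brick) := by unfold Pre_can_fall; infer_instance
def pvWitness_can_fall : (List (Int × Int × Int)) × List Int := ([(0, 0, 1)], [0, 0, 2, 0, 0])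

def Spec_can_fall (spaces : List (Int × Int × Int)) (brick : List Int) (out : Int) : Prop := out = can_fall_alt spaces brick
instance (spaces : List (Int × Int × Int)) (brick : List Int) (out : Int) : Decidable (Spec_can_fall spaces brick out) := by unfold Spec_can_fall; infer_instance

-- ===== CLAIM (what is proved, stated in full; the proofs are below) =====
def Claim_equal_can_fall : Prop := ∀ (spaces : List (Int × Int × Int)) (brick : List Int), Dom_can_fall spaces brick → Pre_can_fall spaces brick → Spec_can_fall spaces brick (can_fall spaces brick)

-- ===== LEMMAS AND PROOFS =====

-- the fueled existence scan is List.any over the corresponding range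
theorem canFall_any_eq (p : Int → Bool) : ∀ (n : Nat) (a : Int),
    canFall_any p n a = (PySem.List.pyRange a (a + n) 1).any p := by
  intro n
  induction n with
  | zero =>
    intro a
    rw [PySem.List.pyRange_one_eq_nil (by omega)]
    rfl
  | succ m ih =>
    intro a
    rw [show a + ((m + 1 : Nat) : Int) = a + (1 + (m : Int)) from by push_cast; ring,
        PySem.List.pyRange_one_cons (by omega)]
    by_cases hp : p a
    · simp [canFall_any, hp]
    · have := ih (a + 1)
      rw [show a + 1 + (m : Int) = a + (1 + (m : Int)) from by ring] at this
      simp [canFall_any, hp, this]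

theorem canFall_any_range (p : Int → Bool) (a b : Int) :
    canFall_any p (b - a).toNat a = (PySem.List.pyRange a b 1).any p := by
  by_cases hab : a ≤ b
  · rw [canFall_any_eq, show a + ((b - a).toNat : Int) = b from by omega]
  · rw [show (b - a).toNat = 0 from by omega, PySem.List.pyRange_one_eq_nil (by omega)]
    rfl

-- the fueled accumulator loop is List.foldl over the corresponding range
theorem canFallAlt_fold_eq (f : Int → Int → Int) : ∀ (n : Nat) (a acc : Int),
    canFallAlt_fold f n a acc = (PySem.List.pyRange a (a + n) 1).foldl f acc := by
  intro n
  induction n with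
  | zero =>
    intro a acc
    rw [PySem.List.pyRange_one_eq_nil (by omega)]
    rfl
  | succ m ih =>
    intro a acc
    rw [show a + ((m + 1 : Nat) : Int) = a + (1 + (m : Int)) from by push_cast; ring,
        PySem.List.pyRange_one_cons (by omega)]
    have := ih (a + 1) (f acc a)
    rw [show a + 1 + (m : Int) = a + (1 + (m : Int)) from by ring] at this
    simp [canFallAlt_fold, this]

theorem canFallAlt_fold_range (f : Int → Int → Int) (a b acc : Int) :
    canFallAlt_fold f (b - a).toNat a acc = (PySem.List.pyRange a b 1).foldl f acc := by
  by_cases hab : a ≤ b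
  · rw [canFallAlt_fold_eq, show a + ((b - a).toNat : Int) = b from by omega]
  · rw [show (b - a).toNat = 0 from by omega, PySem.List.pyRange_one_eq_nil (by omega)]
    rfl

-- B's counting loop is the length of the clear prefix of the level range
theorem colDist_eq (hit : Int → Bool) : ∀ (n : Nat) (k acc : Int),
    canFallAlt_colDist hit n k acc
      = acc + (((PySem.List.pyRange k (k + n) 1).takeWhile (fun j => !hit j)).length : Int) := by
  intro n
  induction n with
  | zero =>
    intro k acc
    rw [PySem.List.pyRange_one_eq_nil (by omega)]
    simp [canFallAlt_colDist]
  | succ m ih =>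
    intro k acc
    rw [show k + ((m + 1 : Nat) : Int) = k + (1 + (m : Int)) from by push_cast; ring,
        PySem.List.pyRange_one_cons (by omega)]
    by_cases hk : hit k
    · simp [canFallAlt_colDist, hk]
    · have := ih (k + 1) (acc + 1)
      rw [show k + 1 + (m : Int) = k + (1 + (m : Int)) from by ring] at this
      simp [canFallAlt_colDist, hk, this]
      omega

theorem colDist_range (hit : Int → Bool) (a b : Int) :
    canFallAlt_colDist hit (b - a).toNat a 0
      = (((PySem.List.pyRange a b 1).takeWhile (fun j => !hit j)).length : Int) := by
  by_cases hab : a ≤ b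
  · rw [colDist_eq, show a + ((b - a).toNat : Int) = b from by omega, zero_add]
  · rw [show (b - a).toNat = 0 from by omega, PySem.List.pyRange_one_eq_nil (by omega)]
    rfl

-- A's outer loop, started at dz with d = dz - 1, returns d + (clear prefix length)
theorem outer_eq (blocked : Int → Bool) : ∀ (n : Nat) (dz d : Int), d = dz - 1 →
    canFall_outer blocked n dz d
      = d + (((PySem.List.pyRange dz (dz + n) 1).takeWhile (fun z => !blocked z)).length : Int) := by
  intro n
  induction n with
  | zero =>
    intro dz d _
    rw [PySem.List.pyRange_one_eq_nil (by omega)]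
    simp [canFall_outer]
  | succ m ih =>
    intro dz d hd
    rw [show dz + ((m + 1 : Nat) : Int) = dz + (1 + (m : Int)) from by push_cast; ring,
        PySem.List.pyRange_one_cons (by omega)]
    by_cases hb : blocked dz
    · simp [canFall_outer, hb]
    · have := ih (dz + 1) dz (by ring)
      rw [show dz + 1 + (m : Int) = dz + (1 + (m : Int)) from by ring] at this
      simp [canFall_outer, hb, this, List.length_cons]
      omega

-- shifting every candidate and the accumulator by 1 shifts the running minimum by 1
theorem foldl_min_shift {α : Type} (f : α → Int) : ∀ (cols : List α) (i : Int),
    cols.foldl (fun b c => if f c + 1 < b then f c + 1 else b) (i + 1)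
      = cols.foldl (fun b c => if f c < b then f c else b) i + 1 := by
  intro cols
  induction cols with
  | nil => intro i; rfl
  | cons c cs ih =>
    intro i
    simp only [List.foldl_cons]
    rw [show (if f c + 1 < i + 1 then f c + 1 else i + 1)
          = (if f c < i then f c else i) + 1 from by split_ifs <;> omega]
    exact ih _

-- a running minimum of nonnegative values started at 0 stays 0
theorem foldl_min_zero {α : Type} (f : α → Int) : ∀ (cols : List α),
    (∀ c ∈ cols, 0 ≤ f c) →
    cols.foldl (fun b c => if f c < b then f c else b) 0 = 0 := by
  intro cols
  induction cols with
  | nil => intro _; rfl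
  | cons c cs ih =>
    intro h
    have hc : 0 ≤ f c := h c (List.mem_cons_self)
    simp only [List.foldl_cons]
    rw [if_neg (by omega)]
    exact ih (fun c hm => h c (List.mem_cons_of_mem _ hm))

-- a running minimum of nonnegatives that meets a 0 is 0
theorem foldl_min_eq_zero {α : Type} (f : α → Int) : ∀ (cols : List α) (i : Int), 0 ≤ i →
    (∀ c ∈ cols, 0 ≤ f c) → (∃ c ∈ cols, f c = 0) →
    cols.foldl (fun b c => if f c < b then f c else b) i = 0 := by
  intro cols
  induction cols with
  | nil =>
    intro i _ _ hex
    rcases hex with ⟨c, hc, _⟩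
    exact absurd hc (List.not_mem_nil)
  | cons c cs ih =>
    intro i hi hnn hex
    simp only [List.foldl_cons]
    by_cases hc0 : f c = 0
    · rw [show (if f c < i then f c else i) = 0 from by split_ifs <;> omega]
      exact foldl_min_zero f cs (fun d hm => hnn d (List.mem_cons_of_mem _ hm))
    · rcases hex with ⟨d, hd, hd0⟩
      rcases List.mem_cons.mp hd with rfl | hd'
      · exact absurd hd0 hc0
      · have hc : 0 ≤ f c := hnn c (List.mem_cons_self)
        exact ih _ (by split_ifs <;> omega)
          (fun e he => hnn e (List.mem_cons_of_mem _ he)) ⟨d, hd', hd0⟩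

-- the running minimum over columns of per-column clear-prefix lengths is the clear-prefix
-- length for "some column is hit"
theorem foldl_min_takeWhile {α : Type} (hit : α → Int → Bool) :
    ∀ (L : List Int) (cols : List α),
    cols.foldl (fun best c =>
        if ((L.takeWhile (fun k => !hit c k)).length : Int) < best
        then ((L.takeWhile (fun k => !hit c k)).length : Int) else best) (L.length : Int)
      = ((L.takeWhile (fun k => !cols.any (fun c => hit c k))).length : Int) := by
  intro L
  induction L with
  | nil =>
    intro cols
    simpa using foldl_min_zero (fun _ : α => (0 : Int)) cols (fun c _ => le_refl 0)
  | cons k L' ih =>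
    intro cols
    by_cases hk : cols.any (fun c => hit c k)
    · rcases List.any_eq_true.mp hk with ⟨c₀, hc₀, hhit⟩
      have hrhs : (k :: L').takeWhile (fun k => !cols.any (fun c => hit c k)) = [] := by
        simp [hk]
      rw [hrhs]
      have := foldl_min_eq_zero
        (fun c => (((k :: L').takeWhile (fun j => !hit c j)).length : Int)) cols
        ((k :: L').length : Int) (Int.natCast_nonneg _) (fun c _ => Int.natCast_nonneg _)
        ⟨c₀, hc₀, by simp [hhit]⟩
      simpa using this
    · have hall : ∀ c ∈ cols, hit c k = false := by
        intro c hc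
        by_contra hne
        exact hk (List.any_eq_true.mpr ⟨c, hc, by simpa using hne⟩)
      have hrhs : (k :: L').takeWhile (fun k => !cols.any (fun c => hit c k))
          = k :: L'.takeWhile (fun k => !cols.any (fun c => hit c k)) := by
        simp [hk]
      rw [hrhs]
      have hcongr : cols.foldl (fun best c =>
            if (((k :: L').takeWhile (fun j => !hit c j)).length : Int) < best
            then (((k :: L').takeWhile (fun j => !hit c j)).length : Int) else best)
            ((k :: L').length : Int)
          = cols.foldl (fun best c =>
            if ((L'.takeWhile (fun j => !hit c j)).length : Int) + 1 < best
            then ((L'.takeWhile (fun j => !hit c j)).length : Int) + 1 else best)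
            ((L'.length : Int) + 1) := by
        rw [show ((k :: L').length : Int) = (L'.length : Int) + 1 from by push_cast [List.length_cons]; ring]
        apply PySem.List.foldl_congr_mem
        intro acc c hc
        rw [show (k :: L').takeWhile (fun j => !hit c j)
              = k :: L'.takeWhile (fun j => !hit c j) from by
            simp [hall c hc]]
        simp
      rw [hcongr, foldl_min_shift, ih]
      simp

-- flattening the two footprint loops into one fold over the column list
theorem foldl_nested (xs ys : List Int) (F : Int → Int × Int → Int) :
    ∀ (i : Int), xs.foldl (fun b x => ys.foldl (fun b y => F b (x, y)) b) i
      = (xs.flatMap (fun x => ys.map (fun y => (x, y)))).foldl F i := by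
  induction xs with
  | nil => intro i; rfl
  | cons x xs ih =>
    intro i
    simp only [List.foldl_cons, List.flatMap_cons, List.foldl_append, List.foldl_map, ih]

-- the existence scan over the flattened column list is the nested existence scan
theorem any_nested (xs ys : List Int) (p : Int → Int → Bool) :
    (xs.flatMap (fun x => ys.map (fun y => (x, y)))).any (fun c => p c.1 c.2)
      = xs.any (fun x => ys.any (fun y => p x y)) := by
  induction xs with
  | nil => rfl
  | cons x xs ih => simp [List.flatMap_cons, List.any_append, List.any_map, Function.comp_def, ih]

-- ===== VERDICT (by name: the statement is the Claim_ definition above) =====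
theorem can_fall_spec : Claim_equal_can_fall := by
  unfold Claim_equal_can_fall
  intro spaces brick _ _
  unfold Spec_can_fall can_fall can_fall_alt
  simp only []
  set h := PySem.List.pyGetD brick 2 0 with hh
  by_cases h1 : h ≤ 1
  · rw [if_pos h1, show (h - 1).toNat = 0 from by omega]
    rfl
  · rw [if_neg h1]
    -- both fueled range loops become List operations over pyRange
    simp only [canFall_any_range, canFallAlt_fold_range, colDist_range]
    set xs := PySem.List.pyRange (PySem.List.pyGetD brick 0 0) (PySem.List.pyGetD brick 3 0 + 1) 1 with hxs
    set ys := PySem.List.pyRange (PySem.List.pyGetD brick 1 0) (PySem.List.pyGetD brick 4 0 + 1) 1 with hys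
    -- A side: clear-prefix length of the level list for the nested blocked test
    rw [outer_eq _ (h - 1).toNat 1 0 (by norm_num),
        show (1 : Int) + (((h - 1).toNat : Nat) : Int) = h from by omega]
    -- B side: flatten the nested fold, then the running-minimum lemma
    rw [foldl_nested xs ys (fun b c =>
          let dist := (((PySem.List.pyRange 1 h 1).takeWhile
            (fun j => !spaces.contains (c.1, c.2, h - j))).length : Int)
          if dist < b then dist else b) (h - 1)]
    simp only []
    have hlen : h - 1 = ((PySem.List.pyRange 1 h 1).length : Int) := by
      rw [PySem.List.length_pyRange_one]; omega
    rw [hlen]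
    rw [foldl_min_takeWhile (fun (c : Int × Int) k => spaces.contains (c.1, c.2, h - k))
        (PySem.List.pyRange 1 h 1) (xs.flatMap (fun x => ys.map (fun y => (x, y))))]
    have hpq : (fun z => !xs.any fun x => ys.any fun y => spaces.contains (x, y, h - z))
        = (fun k => !(xs.flatMap (fun x => ys.map (fun y => (x, y)))).any
            (fun c => spaces.contains (c.1, c.2, h - k))) := by
      funext z
      exact congrArg (fun b => !b) (any_nested xs ys (fun x y => spaces.contains (x, y, h - z))).symm
    rw [hpq]
    omega
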